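-- pv_equiv track=rewrite | github.com/EliFrun/my-leetcode-submissions | submissions/2712-find-the-maximum-number-of-marked-indices/solution.py | maxNumOfMarkedIndices
-- ===== SOURCE A (Python) =====
-- from typing import List
--
-- def maxNumOfMarkedIndices(nums: List[int]) -> int:
--     nums.sort()
--     left, right = 0, len(nums)//2
--     def solve(k):
--         for i in range(k):
--             if nums[i] * 2 > nums[len(nums) - k + i]:
--                 return False
--         return True
--     ret = 0
--     while left <= right:
--         middle = (left + right) // 2
--         if solve(middle):
--             ret = middle
--             left = middle + 1
--         else:
--             right = middle - 1
--
--     return 2 * ret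
-- ===== SOURCE B (Python) =====
-- from typing import List
--
-- def maxNumOfMarkedIndices(nums: List[int]) -> int:
--     nums.sort()
--     n = len(nums)
--     i = 0
--     for j in range(n - n // 2, n):
--         if 2 * nums[i] <= nums[j]:
--             i += 1
--     return 2 * i
-- ===== Notes on version B (the rewrite author's own statement) =====
-- stated objective: faster
-- what changed: Replaces A's binary search over the pair count k (each probe re-scanning k pairs with solve(k)) by a single two-pointer greedy pass over the sorted list that matches each small element to the next feasible element of the upper half.
import Mathlib
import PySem

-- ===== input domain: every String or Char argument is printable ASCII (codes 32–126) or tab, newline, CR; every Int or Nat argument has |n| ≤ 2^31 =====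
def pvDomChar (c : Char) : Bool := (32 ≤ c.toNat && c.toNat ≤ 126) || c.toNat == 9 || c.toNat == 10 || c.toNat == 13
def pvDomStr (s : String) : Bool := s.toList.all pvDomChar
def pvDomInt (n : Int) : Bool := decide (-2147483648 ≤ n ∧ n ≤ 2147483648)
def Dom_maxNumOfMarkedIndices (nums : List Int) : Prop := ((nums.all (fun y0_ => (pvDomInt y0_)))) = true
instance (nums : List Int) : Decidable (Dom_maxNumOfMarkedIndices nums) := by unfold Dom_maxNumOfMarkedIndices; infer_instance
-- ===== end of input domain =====

-- B replaces A's binary search over k (with an O(n) feasibility re-scan per probe) by a single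
-- two-pointer greedy pass over the sorted list; objective: faster after the shared sort.
-- Both A and B sort `nums` in place (same observable mutation); the equivalence proved is about the return value.

-- ===== PORT A =====
-- solve(k): all indices accessed satisfy 0 ≤ i < k ≤ len//2, so both lookups are in range on
-- every call A makes; the `.getD`-style default of pyGetD is unreachable there.
def pvSolveA (nums : List Int) (k : Int) : Bool :=
  (PySem.List.pyRange 0 k 1).all (fun i =>
    !decide (PySem.List.pyGetD nums i 0 * 2 >
      PySem.List.pyGetD nums ((nums.length : Int) - k + i) 0))

def pvLoopA (nums : List Int) (left right ret : Int) : Int :=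
  if h : left ≤ right then
    let middle := PySem.Int.floordiv (left + right) 2
    if pvSolveA nums middle then pvLoopA nums (middle + 1) right middle
    else pvLoopA nums left (middle - 1) ret
  else ret
termination_by (right + 1 - left).toNat
decreasing_by
  · have := PySem.Int.floordiv_two_mid_bounds h; omega
  · have := PySem.Int.floordiv_two_mid_bounds h; omega

def maxNumOfMarkedIndices (nums : List Int) : Int :=
  let s := PySem.List.sorted nums (fun x => x) false
  2 * pvLoopA s 0 (PySem.Int.floordiv (s.length : Int) 2) 0

-- ===== PORT B =====
-- the loop accesses nums[i] only with i < n//2 ≤ n and nums[j] with j in range(n - n//2, n),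
-- so both lookups are in range; pyGetD's default is unreachable.
def maxNumOfMarkedIndices_alt (nums : List Int) : Int :=
  let s := PySem.List.sorted nums (fun x => x) false
  let n : Int := s.length
  let i := (PySem.List.pyRange (n - PySem.Int.floordiv n 2) n 1).foldl
    (fun i j => if 2 * PySem.List.pyGetD s i 0 ≤ PySem.List.pyGetD s j 0 then i + 1 else i) 0
  2 * i

-- ===== PRECONDITION & SPEC =====
def Spec_maxNumOfMarkedIndices (nums : List Int) (out : Int) : Prop := out = maxNumOfMarkedIndices_alt nums
instance (nums : List Int) (out : Int) : Decidable (Spec_maxNumOfMarkedIndices nums out) := by unfold Spec_maxNumOfMarkedIndices; infer_instance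

-- ===== CLAIM (what is proved, stated in full; the proofs are below) =====
def Claim_equal_maxNumOfMarkedIndices : Prop := ∀ (nums : List Int), Dom_maxNumOfMarkedIndices nums → Spec_maxNumOfMarkedIndices nums (maxNumOfMarkedIndices nums)

-- ===== LEMMAS AND PROOFS =====

-- B's greedy pass, over Nat indices: j scans the upper half, i counts matched small elements.
def pvGreedy (s : List Int) (j i : Nat) : Nat :=
  if _h : j < s.length then
    if 2 * s.getD i 0 ≤ s.getD j 0 then pvGreedy s (j + 1) (i + 1) else pvGreedy s (j + 1) i
  else i
termination_by s.length - j

-- feasibility of pairing the k smallest with the k largest, aligned (= A's solve(k))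
def pvFeas (s : List Int) (k : Nat) : Prop :=
  ∀ t, t < k → 2 * s.getD t 0 ≤ s.getD (s.length - k + t) 0

lemma pvMono (s : List Int) (hs : s.Pairwise (· ≤ ·)) {a b : Nat} (hab : a ≤ b)
    (hb : b < s.length) : s.getD a 0 ≤ s.getD b 0 := by
  rcases eq_or_lt_of_le hab with rfl | h
  · exact le_refl _
  · rw [List.getD_eq_getElem s 0 (lt_of_le_of_lt hab hb), List.getD_eq_getElem s 0 hb]
    exact List.pairwise_iff_getElem.mp hs a b _ _ h

lemma pvFeas_mono (s : List Int) (hs : s.Pairwise (· ≤ ·)) {k k' : Nat} (hk : k ≤ s.length)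
    (hf : pvFeas s k) (hkk : k' ≤ k) : pvFeas s k' := by
  intro t ht
  have h1 := hf t (lt_of_lt_of_le ht hkk)
  refine le_trans h1 (pvMono s hs (by omega) (by omega))

lemma pvGreedy_ge (s : List Int) (_hs : s.Pairwise (· ≤ ·)) (k : Nat) (hk : k ≤ s.length)
    (hf : pvFeas s k) :
    ∀ d j i, s.length - j ≤ d → j ≤ s.length → j ≤ i + (s.length - k) → k ≤ pvGreedy s j i := by
  intro d
  induction d with
  | zero =>
    intro j i hd hjn hinv
    have hj : j = s.length := by omega
    rw [pvGreedy]; simp only [hj, lt_irrefl, dite_false]; omega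
  | succ d ih =>
    intro j i hd hjn hinv
    rw [pvGreedy]
    by_cases hj : j < s.length
    · simp only [hj, dite_true]
      by_cases hc : 2 * s.getD i 0 ≤ s.getD j 0
      · simp only [hc, if_true]
        exact ih (j + 1) (i + 1) (by omega) (by omega) (by omega)
      · simp only [hc, if_false]
        refine ih (j + 1) i (by omega) (by omega) ?_
        by_cases he : j + 1 ≤ i + (s.length - k)
        · exact he
        · exfalso
          have hi : i = j - (s.length - k) := by omega
          have hik : i < k := by omega
          have := hf i hik
          have hidx : s.length - k + i = j := by omega
          rw [hidx] at this
          omega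
    · simp only [hj, dite_false]; omega

lemma pvGreedy_bounds (s : List Int) (hs : s.Pairwise (· ≤ ·)) :
    ∀ d j i, s.length - j ≤ d → j ≤ s.length → i ≤ j →
      i ≤ pvGreedy s j i ∧ pvGreedy s j i ≤ i + (s.length - j) ∧
      (∀ t, i ≤ t → t < pvGreedy s j i →
        2 * s.getD t 0 ≤ s.getD (s.length - pvGreedy s j i + t) 0) := by
  intro d
  induction d with
  | zero =>
    intro j i hd hjn hij
    have hj : j = s.length := by omega
    rw [pvGreedy]; simp only [hj, lt_irrefl, dite_false]
    exact ⟨le_refl _, by omega, fun t ht1 ht2 => by omega⟩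
  | succ d ih =>
    intro j i hd hjn hij
    rw [pvGreedy]
    by_cases hj : j < s.length
    · simp only [hj, dite_true]
      by_cases hc : 2 * s.getD i 0 ≤ s.getD j 0
      · simp only [hc, if_true]
        obtain ⟨b1, b2, b3⟩ := ih (j + 1) (i + 1) (by omega) (by omega) (by omega)
        refine ⟨by omega, by omega, ?_⟩
        intro t ht1 ht2
        rcases eq_or_lt_of_le ht1 with rfl | ht
        · have hjle : j ≤ s.length - pvGreedy s (j + 1) (i + 1) + i := by omega
          have hlt : s.length - pvGreedy s (j + 1) (i + 1) + i < s.length := by omega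
          exact le_trans hc (pvMono s hs hjle hlt)
        · exact b3 t (by omega) ht2
      · simp only [hc, if_false]
        obtain ⟨b1, b2, b3⟩ := ih (j + 1) i (by omega) (by omega) (by omega)
        exact ⟨b1, by omega, b3⟩
    · simp only [hj, dite_false]
      exact ⟨le_refl _, by omega, fun t ht1 ht2 => by omega⟩

lemma pvSolveA_iff (s : List Int) (kn : Nat) (hk : kn ≤ s.length) :
    pvSolveA s (kn : Int) = true ↔ pvFeas s kn := by
  unfold pvSolveA
  rw [PySem.List.pyRange_one]
  simp only [List.all_map, List.all_eq_true, List.mem_range, Function.comp, sub_zero,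
    Int.toNat_natCast, zero_add, Bool.not_eq_eq_eq_not, Bool.not_true, decide_eq_false_iff_not,
    not_lt]
  constructor
  · intro h t ht
    have h1 := h t ht
    have hcast : (s.length : Int) - (kn : Int) + (t : Int) = ((s.length - kn + t : Nat) : Int) := by
      push_cast; omega
    rw [hcast] at h1
    simp only [PySem.List.pyGetD_natCast] at h1
    omega
  · intro h t ht
    have hcast : (s.length : Int) - (kn : Int) + (t : Int) = ((s.length - kn + t : Nat) : Int) := by
      push_cast; omega
    rw [hcast]
    simp only [PySem.List.pyGetD_natCast]
    have h1 := h t ht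
    omega

-- characterization of A's solve: for k ≤ n//2, solve(k) holds iff k ≤ greedy count
lemma pvChar (s : List Int) (hs : s.Pairwise (· ≤ ·)) :
    pvGreedy s (s.length - s.length / 2) 0 ≤ s.length / 2 ∧
    (∀ kn, kn ≤ s.length / 2 →
      (pvSolveA s (kn : Int) = true ↔ kn ≤ pvGreedy s (s.length - s.length / 2) 0)) := by
  obtain ⟨b1, b2, b3⟩ := pvGreedy_bounds s hs (s.length + 1) (s.length - s.length / 2) 0
    (by omega) (by omega) (by omega)
  have hcle : pvGreedy s (s.length - s.length / 2) 0 ≤ s.length / 2 := by omega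
  refine ⟨hcle, fun kn hkn => ?_⟩
  rw [pvSolveA_iff s kn (by omega)]
  constructor
  · intro hf
    exact pvGreedy_ge s hs kn (by omega) hf (s.length + 1) (s.length - s.length / 2) 0
      (by omega) (by omega) (by omega)
  · intro hle
    have hfc : pvFeas s (pvGreedy s (s.length - s.length / 2) 0) := fun t ht =>
      b3 t (by omega) ht
    exact pvFeas_mono s hs (by omega) hfc hle

-- A's binary search returns the greedy count c, via the invariant below.
lemma pvLoopA_eq (s : List Int) (hs : s.Pairwise (· ≤ ·)) (c : Nat)
    (hc : c = pvGreedy s (s.length - s.length / 2) 0) :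
    ∀ d (left right ret : Int), (right + 1 - left).toNat ≤ d →
      0 ≤ left → right ≤ ((s.length / 2 : Nat) : Int) → left ≤ (c : Int) + 1 →
      (c : Int) ≤ right → (ret = left - 1 ∨ (ret = 0 ∧ left = 0)) →
      pvLoopA s left right ret = (c : Int) := by
  obtain ⟨hcle, hchar⟩ := pvChar s hs
  intro d
  induction d with
  | zero =>
    intro left right ret hd h1 h2 h3 h4 h5
    rw [pvLoopA]
    have hlr : ¬ left ≤ right := by omega
    simp only [hlr, dite_false]
    omega
  | succ d ih =>
    intro left right ret hd h1 h2 h3 h4 h5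
    rw [pvLoopA]
    by_cases hlr : left ≤ right
    case neg => simp only [hlr, dite_false]; omega
    simp only [hlr, dite_true]
    have hm := PySem.Int.floordiv_two_mid_bounds hlr
    set m := PySem.Int.floordiv (left + right) 2 with hmdef
    have hm0 : 0 ≤ m := by omega
    have hmn : m = ((m.toNat : Nat) : Int) := by omega
    have hmle : m.toNat ≤ s.length / 2 := by omega
    by_cases hsv : pvSolveA s m = true
    · simp only [hsv, if_true]
      have hle : m.toNat ≤ c := by
        rw [hc]; exact (hchar m.toNat hmle).mp (by rw [← hmn]; exact hsv)
      exact ih (m + 1) right m (by omega) (by omega) h2 (by omega) (by omega) (by omega)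
    · simp only [hsv]
      have hgt : ¬ m.toNat ≤ c := by
        intro hcon
        rw [hc] at hcon
        exact hsv (by rw [hmn]; exact (hchar m.toNat hmle).mpr hcon)
      exact ih left (m - 1) ret (by omega) h1 (by omega) h3 (by omega) h5

-- B's fold over the upper-half range computes pvGreedy
lemma pvFoldB_eq (s : List Int) :
    ∀ d (j i : Nat), s.length - j ≤ d → j ≤ s.length →
      (PySem.List.pyRange (j : Int) (s.length : Int) 1).foldl
        (fun i jj => if 2 * PySem.List.pyGetD s i 0 ≤ PySem.List.pyGetD s jj 0 then i + 1 else i)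
        ((i : Nat) : Int) = ((pvGreedy s j i : Nat) : Int) := by
  intro d
  induction d with
  | zero =>
    intro j i hd hj
    have hje : j = s.length := by omega
    rw [PySem.List.pyRange_one_eq_nil (by omega), pvGreedy]
    simp [hje]
  | succ d ih =>
    intro j i hd hj
    by_cases hjl : j < s.length
    · rw [PySem.List.pyRange_one_cons (by exact_mod_cast hjl), pvGreedy]
      simp only [List.foldl_cons, hjl, dite_true, PySem.List.pyGetD_natCast]
      by_cases hc : 2 * s.getD i 0 ≤ s.getD j 0
      · simp only [hc, if_true]
        have : ((i : Int) + 1) = (((i + 1 : Nat)) : Int) := by push_cast; ring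
        rw [this, show ((j : Int) + 1) = (((j + 1 : Nat)) : Int) by push_cast; ring]
        exact ih (j + 1) (i + 1) (by omega) (by omega)
      · simp only [hc, if_false]
        rw [show ((j : Int) + 1) = (((j + 1 : Nat)) : Int) by push_cast; ring]
        exact ih (j + 1) i (by omega) (by omega)
    · have hje : j = s.length := by omega
      rw [PySem.List.pyRange_one_eq_nil (by omega), pvGreedy]
      simp [hje]

-- ===== VERDICT (by name: the statement is the Claim_ definition above) =====
theorem maxNumOfMarkedIndices_spec : Claim_equal_maxNumOfMarkedIndices := by
  intro nums _
  unfold Spec_maxNumOfMarkedIndices maxNumOfMarkedIndices maxNumOfMarkedIndices_alt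
  set s := PySem.List.sorted nums (fun x => x) false with hsdef
  have hs : s.Pairwise (· ≤ ·) := PySem.List.sorted_pairwise nums (fun x => x)
  set c := pvGreedy s (s.length - s.length / 2) 0 with hcdef
  have hfd : PySem.Int.floordiv ((s.length : Nat) : Int) 2 = (((s.length / 2 : Nat)) : Int) := by
    exact_mod_cast PySem.Int.floordiv_natCast s.length 2
  have hA : pvLoopA s 0 (PySem.Int.floordiv (s.length : Int) 2) 0 = (c : Int) := by
    rw [hfd]
    obtain ⟨hcle, _⟩ := pvChar s hs
    exact pvLoopA_eq s hs c hcdef (s.length / 2 + 2) 0 _ 0 (by omega) (by omega) (by omega)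
      (by omega) (by omega) (by omega)
  have hstart : (s.length : Int) - PySem.Int.floordiv ((s.length : Nat) : Int) 2 =
      (((s.length - s.length / 2 : Nat)) : Int) := by
    rw [hfd]; push_cast; omega
  have hB : (PySem.List.pyRange ((s.length : Int) - PySem.Int.floordiv (s.length : Int) 2)
      (s.length : Int) 1).foldl
      (fun i jj => if 2 * PySem.List.pyGetD s i 0 ≤ PySem.List.pyGetD s jj 0 then i + 1 else i)
      0 = (c : Int) := by
    rw [hstart, show (0 : Int) = (((0 : Nat)) : Int) from rfl]
    exact pvFoldB_eq s (s.length + 1) (s.length - s.length / 2) 0 (by omega) (by omega)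
  simp only [hA, hB]
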